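-- pv_equiv track=rewrite | github.com/Langsi97/reve | exercise4.py | max_index_list
-- ===== SOURCE A (Python) =====
-- def max_index_list(L):
--     if len(L) == 1:
--         return 0
--     else:
--         max_index = max_index_list(L[1:])
--         if L[0] > L[max_index]:
--             return 0
--         else:
--             return max_index + 1
-- ===== SOURCE B (Python) =====
-- def max_index_list(L):
--     g = 0
--     for i in range(len(L) - 2, -1, -1):
--         g = 0 if L[i] > L[i + g] else g + 1
--     return g
-- ===== Notes on version B (the rewrite author's own statement) =====
-- stated objective: faster
-- what changed: Replaced A's top-down recursion over list slices (each level copies the suffix) by one bottom-up loop over indices n-2..0 maintaining the single accumulator g with the same comparison L[i] > L[i+g].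
import Mathlib
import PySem

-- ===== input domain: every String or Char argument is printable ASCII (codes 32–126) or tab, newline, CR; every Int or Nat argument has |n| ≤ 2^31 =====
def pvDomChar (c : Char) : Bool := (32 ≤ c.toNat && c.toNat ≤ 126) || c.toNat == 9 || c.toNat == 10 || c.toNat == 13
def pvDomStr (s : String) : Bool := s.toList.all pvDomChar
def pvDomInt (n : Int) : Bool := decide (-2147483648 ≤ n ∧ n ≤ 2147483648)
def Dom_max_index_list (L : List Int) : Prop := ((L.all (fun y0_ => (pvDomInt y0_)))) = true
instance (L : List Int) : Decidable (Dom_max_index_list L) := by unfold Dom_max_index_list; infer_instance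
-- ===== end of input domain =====

-- B replaces A's recursion on list slices by a single bottom-up loop maintaining the same
-- index g; return values are identical on nonempty lists.

-- ===== PORT A =====
-- A's Python: recursion on L[1:]; the comparison indexes the FULL current list
-- (L[0] > L[max_index]); pyGetD is exact here since the index is always in range.
def max_index_list : List Int → Int
  | [] => 0        -- Python recurses forever on []; excluded by Pre_
  | [_] => 0
  | a :: b :: tl =>
    let m := max_index_list (b :: tl)
    if a > PySem.List.pyGetD (a :: b :: tl) m 0 then 0 else m + 1

-- ===== PORT B =====
def bStep (L : List Int) (g i : Int) : Int :=
  if PySem.List.pyGetD L i 0 > PySem.List.pyGetD L (i + g) 0 then 0 else g + 1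

def max_index_list_alt (L : List Int) : Int :=
  (PySem.List.pyRange ((L.length : Int) - 2) (-1) (-1)).foldl (bStep L) 0

-- ===== PRECONDITION & SPEC =====
-- Pre_ excludes only the empty list, on which A recurses forever (RecursionError).
def Pre_max_index_list (L : List Int) : Prop := L ≠ []
instance (L : List Int) : Decidable (Pre_max_index_list L) := by unfold Pre_max_index_list; infer_instance
def pvWitness_max_index_list : List Int := [3, 1, 4]

def Spec_max_index_list (L : List Int) (out : Int) : Prop := out = max_index_list_alt L
instance (L : List Int) (out : Int) : Decidable (Spec_max_index_list L out) := by unfold Spec_max_index_list; infer_instance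

-- ===== CLAIM (what is proved, stated in full; the proofs are below) =====
def Claim_equal_max_index_list : Prop := ∀ (L : List Int), Dom_max_index_list L → Pre_max_index_list L → Spec_max_index_list L (max_index_list L)

-- ===== LEMMAS AND PROOFS =====

-- A's result is a valid index into its argument.
lemma A_bounds : ∀ (L : List Int), L ≠ [] →
    0 ≤ max_index_list L ∧ max_index_list L < L.length := by
  intro L
  induction L with
  | nil => intro h; exact absurd rfl h
  | cons a tl ih =>
    intro _
    cases tl with
    | nil => simp [max_index_list]
    | cons b tl' =>
      obtain ⟨h0, h1⟩ := ih (by simp)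
      simp only [max_index_list]
      split <;> simp_all <;> omega

-- range(j, -1, -1) as an explicit map over List.range
lemma pyRange_down (j : Nat) :
    PySem.List.pyRange (j : Int) (-1) (-1) =
      (List.range (j + 1)).map (fun k : Nat => (j : Int) - (k : Int)) := by
  have h : (-1 : Int) < (j : Int) := by omega
  simp only [PySem.List.pyRange, if_neg (show ¬(-1:Int)=0 by norm_num),
    if_neg (show ¬(0:Int) < -1 by norm_num), if_pos h]
  have hc : ((↑j - (-1:Int) + -(-1) - 1) / -(-1)).toNat = j + 1 := by
    have h2 : ((↑j : Int) - (-1) + -(-1) - 1) / -(-1) = (j : Int) + 1 := by norm_num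
    rw [h2]; omega
  rw [hc]
  apply List.map_congr_left
  intro k _
  omega

lemma pyRange_down_cons (j : Nat) :
    PySem.List.pyRange ((j + 1 : Nat) : Int) (-1) (-1) =
      ((j + 1 : Nat) : Int) :: PySem.List.pyRange (j : Int) (-1) (-1) := by
  rw [pyRange_down, pyRange_down, List.range_succ_eq_map]
  simp only [List.map_cons, List.map_map, Nat.cast_zero, sub_zero]
  congr 1
  apply List.map_congr_left
  intro k _
  simp only [Function.comp_apply, Nat.succ_eq_add_one]
  omega

-- one loop step of B performs exactly one unfolding of A on the suffix starting at j
lemma step_eq (L : List Int) (j : Nat) (h : j + 1 < L.length) :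
    bStep L (max_index_list (L.drop (j + 1))) (j : Int) = max_index_list (L.drop j) := by
  have hj : j < L.length := by omega
  have hne : L.drop (j + 1) ≠ [] := by
    simp only [ne_eq, List.drop_eq_nil_iff]
    omega
  obtain ⟨c, rest, hd1⟩ := List.exists_cons_of_ne_nil hne
  have hd0 : L.drop j = L[j] :: c :: rest := by
    rw [List.drop_eq_getElem_cons hj, hd1]
  obtain ⟨hm0, hm1⟩ := A_bounds (L.drop (j + 1)) hne
  set m := max_index_list (L.drop (j + 1)) with hm
  have hlen : (L.drop (j + 1)).length = L.length - (j + 1) := by simp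
  rw [hlen] at hm1
  have e1 : PySem.List.pyGetD L (j : Int) 0 = L[j] := by
    rw [PySem.List.pyGetD_natCast]
    exact List.getD_eq_getElem L 0 hj
  have hjm : (j : Int) + m < L.length := by omega
  have e2 : PySem.List.pyGetD L ((j : Int) + m) 0 = PySem.List.pyGetD (L.drop j) m 0 := by
    rw [PySem.List.pyGetD_eq_getElem L 0 (by omega) hjm,
        PySem.List.pyGetD_eq_getElem (L.drop j) 0 hm0 (by simp only [List.length_drop]; omega)]
    rw [List.getElem_drop]
    congr 1
    omega
  have hmc : max_index_list (c :: rest) = m := by rw [hm, hd1]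
  rw [hd0]
  simp only [max_index_list, bStep, hmc, e1, e2, hd0]

-- loop invariant: folding B's step over j, j-1, …, 0 starting from A's value on the
-- suffix at j+1 produces A's value on the whole list
lemma foldl_inv : ∀ (j : Nat) (L : List Int), j + 1 < L.length →
    (PySem.List.pyRange (j : Int) (-1) (-1)).foldl (bStep L)
      (max_index_list (L.drop (j + 1))) = max_index_list L := by
  intro j
  induction j with
  | zero =>
    intro L h
    have h0 : PySem.List.pyRange ((0 : Nat) : Int) (-1) (-1) = [0] := by decide
    rw [h0]
    simp only [List.foldl_cons, List.foldl_nil]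
    simpa using step_eq L 0 h
  | succ j ih =>
    intro L h
    rw [pyRange_down_cons j]
    simp only [List.foldl_cons]
    rw [step_eq L (j + 1) h]
    exact ih L (by omega)

lemma singleton_A (x : Int) : max_index_list [x] = 0 := rfl

-- ===== VERDICT (by name: the statement is the Claim_ definition above) =====
theorem max_index_list_spec : Claim_equal_max_index_list := by
  intro L _ hpre
  unfold Spec_max_index_list max_index_list_alt
  match L, hpre with
  | [x], _ =>
    simp [singleton_A, PySem.List.pyRange]
  | a :: b :: tl, _ =>
    set L := a :: b :: tl with hL
    have hlen : 2 ≤ L.length := by simp [hL]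
    have hcast : ((L.length : Int) - 2) = ((L.length - 2 : Nat) : Int) := by omega
    rw [hcast]
    have h1 : L.length - 2 + 1 = L.length - 1 := by omega
    have hlen1 : (L.drop (L.length - 1)).length = 1 := by
      simp only [List.length_drop]; omega
    obtain ⟨y, hy⟩ := List.length_eq_one_iff.mp hlen1
    have := foldl_inv (L.length - 2) L (by omega)
    rw [h1, hy, singleton_A] at this
    exact this.symm
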